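-- pv_equiv track=rewrite | github.com/Nurmanbetov/algorithms | codify.py | find
-- ===== SOURCE A (Python) =====
-- def find(nums): #not completed
--     x = [i for i in nums if i >0]
--     y = [i for i in nums if i<0]
--     res = []
--     res1 = 0
--     for t in x:
--         if -t in y:res.append(t)
--     for w in res:
--         if w>res1:
--             res1 = w
--             return res1
-- ===== SOURCE B (Python) =====
-- def find(nums):
--     # First-occurrence index of every value, built in one pass.
--     first = {}
--     for idx, v in enumerate(nums):
--         first.setdefault(v, idx)
--     # Candidate values: positive and negation present anywhere.
--     cands = [v for v in first if v > 0 and -v in first]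
--     # The answer is the candidate occurring earliest in nums.
--     return min(cands, key=first.get) if cands else None
-- ===== Notes on version B (the rewrite author's own statement) =====
-- stated objective: faster
-- what changed: Instead of building a matches list and scanning it, B builds a first-occurrence-index dict in one pass, intersects the distinct positives with the negated negatives, and returns the candidate with the minimal first index via min(..., key=first.get).
import Mathlib
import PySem

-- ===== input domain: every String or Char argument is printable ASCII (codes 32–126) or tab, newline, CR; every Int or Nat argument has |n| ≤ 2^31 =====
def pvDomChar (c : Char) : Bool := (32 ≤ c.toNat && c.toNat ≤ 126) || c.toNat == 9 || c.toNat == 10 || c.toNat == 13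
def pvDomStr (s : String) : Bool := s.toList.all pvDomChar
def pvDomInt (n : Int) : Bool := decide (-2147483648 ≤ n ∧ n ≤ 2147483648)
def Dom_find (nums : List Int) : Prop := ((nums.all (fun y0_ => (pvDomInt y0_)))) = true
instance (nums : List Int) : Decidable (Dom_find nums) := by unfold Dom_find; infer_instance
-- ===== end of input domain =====

-- B replaces A's build-all-matches list and linear rescans by a first-occurrence-index dict
-- built in one pass, candidate selection over its distinct keys, and an argmin by first index.

-- ===== PORT A =====
-- second loop of A: first w in res with w > res1 (res1 never updated before returning)
def findScan (res : List Int) (res1 : Int) : Option Int :=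
  match res with
  | [] => none
  | w :: ws => if res1 < w then some w else findScan ws res1

def find (nums : List Int) : Option Int :=
  let x := nums.filter (fun i => 0 < i)
  let y := nums.filter (fun i => i < 0)
  let res := x.foldl (fun r t => if (-t) ∈ y then r ++ [t] else r) []
  findScan res 0

-- ===== PORT B =====
def find_alt (nums : List Int) : Option Int :=
  -- first = {}; for idx, v in enumerate(nums): first.setdefault(v, idx)
  let first := (PySem.List.enumerate nums 0).foldl
      (fun d p => d.setdefault p.2 p.1) (PySem.Dict.empty : PySem.Dict Int Int)
  -- cands = [v for v in first if v > 0 and -v in first]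
  let cands := first.keys.filter (fun v => decide (0 < v) && first.contains (-v))
  -- min(cands, key=first.get) if cands else None  (every candidate is a key, so get = getD _ 0)
  PySem.List.min? cands (fun v => first.getD v 0)

-- ===== PRECONDITION & SPEC =====
def Spec_find (nums : List Int) (out : Option Int) : Prop := out = find_alt nums
instance (nums : List Int) (out : Option Int) : Decidable (Spec_find nums out) := by unfold Spec_find; infer_instance

-- ===== CLAIM =====
def Claim_equal_find : Prop := ∀ (nums : List Int), Dom_find nums → Spec_find nums (find nums)

-- ===== LEMMAS AND PROOFS =====

-- A's res accumulator is a filter of x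
theorem find_res_eq (x y : List Int) (acc : List Int) :
    x.foldl (fun r t => if (-t) ∈ y then r ++ [t] else r) acc
      = acc ++ x.filter (fun t => decide ((-t) ∈ y)) := by
  induction x generalizing acc with
  | nil => simp
  | cons t ts ih =>
    simp only [List.foldl_cons, List.filter_cons]
    by_cases h : (-t) ∈ y <;> simp [h, ih]

-- A's second loop with res1 = 0 returns the head when all elements are positive
theorem findScan_head (res : List Int) (hpos : ∀ w ∈ res, 0 < w) :
    findScan res 0 = res.head? := by
  cases res with
  | nil => rfl
  | cons w ws =>
    have := hpos w (List.mem_cons_self)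
    simp [findScan, this]

-- first index (counting from s) of k in nums
def fIdx (nums : List Int) (s : Int) (k : Int) : Option Int :=
  match nums with
  | [] => none
  | x :: xs => if x = k then some s else fIdx xs (s + 1) k

theorem fIdx_isSome (nums : List Int) (s k : Int) :
    (fIdx nums s k).isSome = true ↔ k ∈ nums := by
  induction nums generalizing s with
  | nil => simp [fIdx]
  | cons x xs ih =>
    by_cases h : x = k
    · subst h; simp [fIdx]
    · simp [fIdx, h, ih, List.mem_cons, Ne.symm h]

theorem fIdx_ge (nums : List Int) (s k i : Int) (h : fIdx nums s k = some i) : s ≤ i := by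
  induction nums generalizing s with
  | nil => simp [fIdx] at h
  | cons x xs ih =>
    by_cases hx : x = k
    · simp [fIdx, hx] at h; omega
    · simp [fIdx, hx] at h; have := ih (s + 1) h; omega

theorem fIdx_inj (nums : List Int) (s k k' i : Int)
    (h : fIdx nums s k = some i) (h' : fIdx nums s k' = some i) : k = k' := by
  induction nums generalizing s with
  | nil => simp [fIdx] at h
  | cons x xs ih =>
    simp only [fIdx] at h h'
    by_cases hx : x = k
    · subst hx
      rw [if_pos rfl] at h
      by_cases hx' : x = k'
      · exact hx'
      · rw [if_neg hx'] at h'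
        have := fIdx_ge xs (s + 1) k' i h'
        have hi : some s = some i := h
        simp at hi; omega
    · rw [if_neg hx] at h
      by_cases hx' : x = k'
      · subst hx'
        rw [if_pos rfl] at h'
        have := fIdx_ge xs (s + 1) k i h
        have hi : some s = some i := h'
        simp at hi; omega
      · rw [if_neg hx'] at h'
        exact ih (s + 1) h h'

-- the head of nums.filter p has the least first-occurrence index among p-values of nums
theorem fIdx_head_min (p : Int → Bool) (nums : List Int) (s : Int) (v h0 : Int) (t' : List Int)
    (hf : nums.filter p = h0 :: t') (hv : v ∈ nums) (hp : p v = true) :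
    ∃ i j, fIdx nums s h0 = some i ∧ fIdx nums s v = some j ∧ i ≤ j := by
  induction nums generalizing s t' with
  | nil => simp at hf
  | cons x xs ih =>
    by_cases hpx : p x = true
    · rw [List.filter_cons_of_pos hpx] at hf
      have hx0 : x = h0 := (List.cons.injEq ..).mp hf |>.1
      refine ⟨s, ?_⟩
      by_cases hxv : x = v
      · exact ⟨s, by simp [fIdx, hx0], by simp [fIdx, hxv], le_refl s⟩
      · have hvxs : v ∈ xs := by
          cases hv with
          | head => exact absurd rfl hxv
          | tail _ h => exact h
        obtain ⟨j, hj⟩ := Option.isSome_iff_exists.mp ((fIdx_isSome xs (s+1) v).mpr hvxs)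
        exact ⟨j, by simp [fIdx, hx0], by simp [fIdx, hxv, hj],
          by have := fIdx_ge xs (s+1) v j hj; omega⟩
    · rw [List.filter_cons_of_neg (by simpa using hpx)] at hf
      have hxh0 : x ≠ h0 := by
        intro he; subst he
        have : x ∈ List.filter p xs := hf ▸ List.mem_cons_self
        exact hpx (List.of_mem_filter this)
      have hxv : x ≠ v := by intro he; subst he; exact hpx hp
      have hvxs : v ∈ xs := by
        cases hv with
        | head => exact absurd rfl hxv
        | tail _ h => exact h
      obtain ⟨i, j, hi, hj, hij⟩ := ih (s + 1) t' hf hvxs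
      exact ⟨i, j, by simp [fIdx, hxh0, hi], by simp [fIdx, hxv, hj], hij⟩

-- the dict built by B's fold: lookup = first index
theorem firstDict_get? (nums : List Int) (s : Int) (d : PySem.Dict Int Int) (k : Int) :
    ((PySem.List.enumerate nums s).foldl (fun d p => d.setdefault p.2 p.1) d).get? k
      = ((d.get? k).or (fIdx nums s k)) := by
  induction nums generalizing s d with
  | nil => simp [fIdx, PySem.List.enumerate]
  | cons x xs ih =>
    rw [PySem.List.enumerate_cons]
    simp only [List.foldl_cons]
    rw [ih]
    by_cases hx : x = k
    · subst hx
      rw [PySem.Dict.get?_setdefault_self]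
      simp only [fIdx, reduceIte]
      cases d.get? x <;> simp
    · rw [PySem.Dict.get?_setdefault_of_ne _ _ (Ne.symm hx)]
      simp [fIdx, hx]

-- the dict built by B's fold: keys = distinct values in first-occurrence order
theorem firstDict_keys (nums : List Int) (s : Int) (d : PySem.Dict Int Int) :
    ((PySem.List.enumerate nums s).foldl (fun d p => d.setdefault p.2 p.1) d).keys
      = nums.foldl PySem.Set.add d.keys := by
  induction nums generalizing s d with
  | nil => simp [PySem.List.enumerate]
  | cons x xs ih =>
    rw [PySem.List.enumerate_cons]
    simp only [List.foldl_cons]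
    rw [ih]
    congr 1
    rw [PySem.Dict.keys_setdefault]
    have hc : d.contains x = decide (x ∈ d.keys) := by
      rw [Bool.eq_iff_iff]
      simp [PySem.Dict.contains, PySem.Dict.keys, List.any_eq_true, List.mem_map]
    rw [PySem.Set.add, PySem.Set.contains, hc]
    by_cases hm : x ∈ d.keys <;> simp [hm]

theorem dict_contains_eq (d : PySem.Dict Int Int) (k : Int) :
    d.contains k = (d.get? k).isSome := by
  rw [Bool.eq_iff_iff]
  simp [PySem.Dict.contains, PySem.Dict.get?, List.find?_isSome, List.any_eq_true]

-- one step of min?'s left fold, phrased on min? itself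
theorem min?_cons_cons (key : Int → Int) (m x : Int) (xs : List Int) :
    PySem.List.min? (m :: x :: xs) key
      = PySem.List.min? ((if key x < key m then x else m) :: xs) key := by
  simp only [PySem.List.min?, List.foldl_cons]
  by_cases h : key x < key m <;> simp [h]

-- min? keeps a head no later element beats
theorem min?_keep (key : Int → Int) (l : List Int) (m : Int)
    (h : ∀ y ∈ l, ¬ key y < key m) :
    PySem.List.min? (m :: l) key = some m := by
  induction l with
  | nil => simp [PySem.List.min?]
  | cons x xs ih =>
    rw [min?_cons_cons, if_neg (h x List.mem_cons_self)]
    exact ih (fun y hy => h y (List.mem_cons_of_mem _ hy))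

-- min? returns the unique strict minimum wherever it sits
theorem min?_eq_of_strict_min (l : List Int) (key : Int → Int) (m : Int)
    (hm : m ∈ l) (hmin : ∀ y ∈ l, y ≠ m → key m < key y) :
    PySem.List.min? l key = some m := by
  have main : ∀ (l : List Int) (acc : Int), m ∈ l →
      (∀ y ∈ l, y ≠ m → key m < key y) → key m < key acc →
      PySem.List.min? (acc :: l) key = some m := by
    intro l
    induction l with
    | nil => intro acc h _ _; simp at h
    | cons x xs ih =>
      intro acc hmem hk hacc
      rw [min?_cons_cons]
      by_cases hxm : x = m
      · subst hxm
        rw [if_pos hacc]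
        exact min?_keep key xs x (fun y hy => by
          by_cases hy' : y = x
          · subst hy'; omega
          · have := hk y (List.mem_cons_of_mem _ hy) hy'; omega)
      · have hmxs : m ∈ xs := by
          cases hmem with
          | head => exact absurd rfl (Ne.symm hxm)
          | tail _ h => exact h
        have hkx : key m < key x := hk x List.mem_cons_self hxm
        by_cases hlt : key x < key acc
        · rw [if_pos hlt]
          exact ih x hmxs (fun y hy hne => hk y (List.mem_cons_of_mem _ hy) hne) hkx
        · rw [if_neg hlt]
          exact ih acc hmxs (fun y hy hne => hk y (List.mem_cons_of_mem _ hy) hne) hacc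
  cases l with
  | nil => simp at hm
  | cons h t =>
    by_cases hhm : h = m
    · subst hhm
      exact min?_keep key t h (fun y hy => by
        by_cases hy' : y = h
        · subst hy'; omega
        · have := hmin y (List.mem_cons_of_mem _ hy) hy'; omega)
    · have hmt : m ∈ t := by
        cases hm with
        | head => exact absurd rfl (Ne.symm hhm)
        | tail _ h => exact h
      exact main t h hmt (fun y hy hne => hmin y (List.mem_cons_of_mem _ hy) hne)
        (hmin h List.mem_cons_self hhm)

-- ===== VERDICT =====
theorem find_spec : Claim_equal_find := by
  intro nums _
  show find nums = find_alt nums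
  set p : Int → Bool := fun v => decide (0 < v) && decide ((-v) ∈ nums) with hp
  -- A's side: head? of nums.filter p
  have hA : find nums = (nums.filter p).head? := by
    simp only [find]
    rw [find_res_eq, List.filter_filter]
    rw [findScan_head _ (fun w hw => by
      have := List.of_mem_filter hw
      simp at this
      exact this.2)]
    rw [List.nil_append]
    congr 1
    apply List.filter_congr
    intro v _
    by_cases h1 : 0 < v
    · by_cases h2 : (-v) ∈ nums
      · simp [hp, h1, h2, List.mem_filter]
      · simp [hp, h1, h2, List.mem_filter]
    · simp [hp, h1, List.mem_filter]
  -- B's side: min? over the distinct p-values of nums, keyed by first index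
  have hget : ∀ k, ((PySem.List.enumerate nums 0).foldl
      (fun d p => d.setdefault p.2 p.1) (PySem.Dict.empty : PySem.Dict Int Int)).get? k
        = fIdx nums 0 k := by
    intro k
    rw [firstDict_get?]
    simp [PySem.Dict.empty, PySem.Dict.get?]
  have hB : find_alt nums
      = PySem.List.min? ((PySem.List.dedup nums).filter p) (fun v => (fIdx nums 0 v).getD 0) := by
    simp only [find_alt]
    have hkeys : ((PySem.List.enumerate nums 0).foldl
        (fun d p => d.setdefault p.2 p.1) (PySem.Dict.empty : PySem.Dict Int Int)).keys
          = PySem.List.dedup nums := by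
      rw [firstDict_keys, PySem.List.dedup_eq_ofList, PySem.Set.ofList_eq_foldl]
      simp [PySem.Dict.empty, PySem.Dict.keys]
    rw [hkeys]
    have hfil : (PySem.List.dedup nums).filter
        (fun v => decide (0 < v) && (((PySem.List.enumerate nums 0).foldl
          (fun d p => d.setdefault p.2 p.1) (PySem.Dict.empty : PySem.Dict Int Int)).contains (-v)))
        = (PySem.List.dedup nums).filter p := by
      congr 1
      funext v
      rw [dict_contains_eq, hget]
      have hiff : (fIdx nums 0 (-v)).isSome = decide ((-v) ∈ nums) := by
        rw [Bool.eq_iff_iff, fIdx_isSome]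
        simp
      rw [hiff, hp]
    rw [hfil]
    congr 1
    funext v
    rw [PySem.Dict.getD, hget]
  rw [hA, hB]
  cases hL : nums.filter p with
  | nil =>
    have hd : (PySem.List.dedup nums).filter p = [] := by
      rw [List.filter_eq_nil_iff]
      intro v hv
      have hvn : v ∈ nums := (PySem.List.mem_dedup nums v).mp hv
      simpa using List.filter_eq_nil_iff.mp hL v hvn
    rw [hd]
    simp [PySem.List.min?]
  | cons h0 t =>
    have hh0 : h0 ∈ nums ∧ p h0 = true := by
      have : h0 ∈ nums.filter p := hL ▸ List.mem_cons_self
      exact ⟨List.mem_of_mem_filter this, List.of_mem_filter this⟩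
    rw [List.head?_cons]
    refine (min?_eq_of_strict_min _ _ h0 ?_ ?_).symm
    · exact List.mem_filter.mpr ⟨(PySem.List.mem_dedup nums h0).mpr hh0.1, hh0.2⟩
    · intro v hv hne
      have hvn : v ∈ nums := (PySem.List.mem_dedup nums v).mp (List.mem_of_mem_filter hv)
      have hpv : p v = true := List.of_mem_filter hv
      obtain ⟨i, j, hi, hj, hij⟩ := fIdx_head_min p nums 0 v h0 t hL hvn hpv
      have hne' : i ≠ j := by
        intro he; subst he
        exact hne (fIdx_inj nums 0 v h0 i hj hi)
      simp only [hi, hj, Option.getD_some]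
      omega
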